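-- pv_equiv track=rewrite | github.com/AdamZhouSE/pythonHomework | Code/CodeRecords/2815/48102/246226.py | multi1
-- ===== SOURCE A (Python) =====
-- def multi1(n: int, ls: list) -> int:
--     ls.sort()
--     len_ls = len(ls)
--     steps = 0
--     left = -1
--     right = len_ls
--     while left != right - 1:
--         if ls[left+1] <= -1:
--             steps += (-1 - ls[left+1])
--             left += 1
--         if ls[right-1] >= 0:
--             steps += abs(ls[right-1] - 1)
--             right -= 1
--     if left % 2 != 1:
--         if ls[right] + 1 >= 1 - ls[left]:
--             steps += 2
--         else:
--             steps -= abs(ls[right]-1)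
--             steps += ls[right] + 1
--     return steps
-- ===== SOURCE B (Python) =====
-- def multi1(n: int, ls: list) -> int:
--     neg = sum(1 for v in ls if v <= -1)
--     steps = sum((-1 - v) if v <= -1 else abs(v - 1) for v in ls)
--     if neg % 2 == 1:
--         m = min(v for v in ls if v >= 0)
--         steps += 2 if m >= 1 else 0
--     return steps
-- ===== Notes on version B (the rewrite author's own statement) =====
-- stated objective: faster
-- what changed: Replaces A's in-place sort followed by a converging two-pointer while-loop and a branchy post-block with a single order-independent pass (count of elements <= -1 plus a sum of per-element costs) and a min over the nonnegative elements, with the post-block collapsed to '+2 iff that min is >= 1'; B does not sort and does not mutate ls.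
import Mathlib
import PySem

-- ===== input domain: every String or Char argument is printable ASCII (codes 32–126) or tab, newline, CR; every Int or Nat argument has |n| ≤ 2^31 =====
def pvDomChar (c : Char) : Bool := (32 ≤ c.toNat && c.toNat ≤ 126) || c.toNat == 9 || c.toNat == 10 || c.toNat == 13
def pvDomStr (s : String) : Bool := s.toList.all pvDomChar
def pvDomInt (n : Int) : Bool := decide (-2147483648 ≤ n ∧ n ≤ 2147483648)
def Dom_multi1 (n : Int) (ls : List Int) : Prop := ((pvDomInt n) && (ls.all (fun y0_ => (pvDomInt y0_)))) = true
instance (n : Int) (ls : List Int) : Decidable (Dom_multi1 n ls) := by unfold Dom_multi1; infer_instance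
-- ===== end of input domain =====

-- B replaces A's sort + converging two-pointer while-loop by one order-independent
-- pass (count + sum) plus a min over the nonnegatives; return-value equivalence only:
-- A sorts ls in place, B does not mutate ls.

-- ===== PORT A =====
-- ls[i] inside A: Python indexing; A's loop only reads in-range indices, the
-- post-block read ls[right] is out of range exactly where A raises (outside Pre_).
def pvGetI (s : List Int) (i : Int) : Int := (PySem.List.pyGet? s i).getD 0

-- A's while-loop, fueled (each iteration of A's loop on an Int list strictly
-- shrinks right-left, so length+1 fuel is never exhausted); state (steps, left, right)
def multi1Loop (s : List Int) : Nat → Int × Int × Int → Int × Int × Int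
  | 0, st => st
  | fuel+1, (steps, left, right) =>
    if left = right - 1 then (steps, left, right)
    else
      let p := if pvGetI s (left+1) ≤ -1 then (steps + (-1 - pvGetI s (left+1)), left+1)
               else (steps, left)
      let q := if 0 ≤ pvGetI s (right-1) then (p.1 + |pvGetI s (right-1) - 1|, right-1)
               else (p.1, right)
      multi1Loop s fuel (q.1, p.2, q.2)

def multi1 (n : Int) (ls : List Int) : Int :=
  let s := PySem.List.sorted ls (fun v => v) false
  let lenLs : Int := s.length
  let r := multi1Loop s (s.length + 1) (0, -1, lenLs)
  let steps := r.1
  let left := r.2.1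
  let right := r.2.2
  if PySem.Int.mod left 2 ≠ 1 then
    if pvGetI s right + 1 ≥ 1 - pvGetI s left then steps + 2
    else steps - |pvGetI s right - 1| + (pvGetI s right + 1)
  else steps

-- ===== PORT B =====
-- per-element contribution: (-1 - v) if v <= -1 else abs(v - 1)
def pvF (v : Int) : Int := if v ≤ -1 then -1 - v else |v - 1|

def multi1_alt (n : Int) (ls : List Int) : Int :=
  let neg : Int := ((ls.filter (fun v => decide (v ≤ -1))).length : Int)
  let steps : Int := (ls.map pvF).sum
  if PySem.Int.mod neg 2 = 1 then
    let m := (PySem.List.min? (ls.filter (fun v => decide (0 ≤ v))) (fun v => v)).getD 0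
    steps + (if 1 ≤ m then 2 else 0)
  else steps

-- ===== PRECONDITION & SPEC =====
-- Pre_ excludes exactly the inputs where A raises IndexError (and B ValueError):
-- an odd number of elements ≤ -1 and no element ≥ 0.
def Pre_multi1 (n : Int) (ls : List Int) : Prop :=
  (ls.filter (fun v => decide (v ≤ -1))).length % 2 = 1 →
    (ls.filter (fun v => decide (v ≤ -1))).length < ls.length
instance (n : Int) (ls : List Int) : Decidable (Pre_multi1 n ls) := by
  unfold Pre_multi1; infer_instance
def pvWitness_multi1 : Int × List Int := (0, [-3, 2])
def Spec_multi1 (n : Int) (ls : List Int) (out : Int) : Prop := out = multi1_alt n ls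
instance (n : Int) (ls : List Int) (out : Int) : Decidable (Spec_multi1 n ls out) := by unfold Spec_multi1; infer_instance

-- ===== CLAIM (what is proved, stated in full; the proofs are below) =====
def Claim_equal_multi1 : Prop := ∀ (n : Int) (ls : List Int), Dom_multi1 n ls → Pre_multi1 n ls → Spec_multi1 n ls (multi1 n ls)

-- ===== LEMMAS AND PROOFS =====

lemma pvGetI_nat (s : List Int) (i : Nat) (h : i < s.length) : pvGetI s (i : Int) = s[i] := by
  simp [pvGetI, PySem.List.pyGet?_natCast, List.getElem?_eq_getElem h]

-- window of the two-pointer loop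
def pvWin (s : List Int) (a b : Nat) : List Int := (s.drop a).take (b - a)

lemma pvWin_cons (s : List Int) (a b : Nat) (hab : a < b) (hb : b ≤ s.length) :
    pvWin s a b = s[a]'(by omega) :: pvWin s (a+1) b := by
  unfold pvWin
  rw [List.drop_eq_getElem_cons (by omega)]
  have : b - a = (b - (a+1)) + 1 := by omega
  rw [this, List.take_succ_cons]

lemma pvWin_concat (s : List Int) (a b : Nat) (hab : a < b) (hb : b ≤ s.length) :
    pvWin s a b = pvWin s a (b-1) ++ [s[b-1]'(by omega)] := by
  unfold pvWin
  have h1 : b - a = (b - 1 - a) + 1 := by omega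
  rw [h1, List.take_add_one]
  congr 1
  have h2 : (s.drop a)[b-1-a]? = s[b-1]? := by
    rw [List.getElem?_drop]; congr 1; omega
  rw [h2, List.getElem?_eq_getElem (by omega)]
  rfl

-- the loop on a sorted list computes the split point and the order-free sum
lemma loop_spec (s : List Int) (hs : List.Pairwise (· ≤ ·) s) :
    ∀ (fuel : Nat) (a b : Nat) (steps : Int), a ≤ b → b ≤ s.length → b - a ≤ fuel →
    multi1Loop s fuel (steps, (a:Int)-1, (b:Int)) =
      (steps + ((pvWin s a b).map pvF).sum,
       (a:Int) + ((pvWin s a b).filter (fun v => decide (v ≤ -1))).length - 1,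
       (a:Int) + ((pvWin s a b).filter (fun v => decide (v ≤ -1))).length) := by
  intro fuel
  induction fuel with
  | zero =>
    intro a b steps hab hb hfuel
    have hba : a = b := by omega
    subst hba
    simp [multi1Loop, pvWin]
  | succ fuel ih =>
    intro a b steps hab hb hfuel
    by_cases heq : a = b
    · subst heq
      simp [multi1Loop, pvWin]
    · have hab' : a < b := by omega
      have hne : ¬ ((a:Int) - 1 = (b:Int) - 1) := by
        intro h; omega
      have hwc := pvWin_cons s a b hab' hb
      have hga : pvGetI s ((a:Int) - 1 + 1) = s[a]'(by omega) := by
        have : (a:Int) - 1 + 1 = (a:Int) := by ring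
        rw [this, pvGetI_nat s a (by omega)]
      have hgb : pvGetI s ((b:Int) - 1) = s[b-1]'(by omega) := by
        have : (b:Int) - 1 = ((b-1 : Nat) : Int) := by omega
        rw [this, pvGetI_nat s (b-1) (by omega)]
      have hmono : s[a]'(by omega) ≤ s[b-1]'(by omega) := by
        rcases Nat.lt_or_ge a (b-1) with h | h
        · exact (List.pairwise_iff_getElem.mp hs) a (b-1) (by omega) (by omega) h
        · have : a = b - 1 := by omega
          subst this; rfl
      rw [multi1Loop]
      rw [if_neg hne]
      by_cases hA : s[a]'(by omega) ≤ -1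
      · -- first if fires
        by_cases hB : (0:Int) ≤ s[b-1]'(by omega)
        · -- both fire
          have hab2 : a + 1 ≤ b - 1 := by
            by_contra hcon
            have h3 : a = b - 1 := by omega
            subst h3
            omega
          simp only [hga, hgb, if_pos hA, if_pos hB]
          have hleft : (a:Int) - 1 + 1 = ((a+1 : Nat) : Int) - 1 := by push_cast; ring
          have hright : (b:Int) - 1 = ((b-1 : Nat) : Int) := by omega
          rw [hleft, hright, ih (a+1) (b-1) _ (by omega) (by omega) (by omega)]
          -- decompose window: w = s[a] :: (mid ++ [s[b-1]])
          have hwm : pvWin s (a+1) b = pvWin s (a+1) (b-1) ++ [s[b-1]'(by omega)] := by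
            have := pvWin_concat s (a+1) b (by omega) hb
            simpa using this
          rw [hwc, hwm]
          have hAd : decide (s[a]'(by omega) ≤ -1) = true := by simp [hA]
          have hBd : decide (s[b-1]'(by omega) ≤ -1) = false := by simp; omega
          have hfa : pvF (s[a]'(by omega)) = -1 - s[a]'(by omega) := by simp [pvF, hA]
          have hfb : pvF (s[b-1]'(by omega)) = |s[b-1]'(by omega) - 1| := by
            simp [pvF]; omega
          rw [Prod.mk.injEq, Prod.mk.injEq]
          refine ⟨?_, ?_, ?_⟩
          · simp [hfa, hfb]; ring
          · simp [List.filter_append, hAd, hBd]; ring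
          · simp [List.filter_append, hAd, hBd]; ring
        · -- only first fires
          simp only [hga, hgb, if_pos hA, if_neg hB]
          have hleft : (a:Int) - 1 + 1 = ((a+1 : Nat) : Int) - 1 := by push_cast; ring
          rw [hleft, ih (a+1) b _ (by omega) hb (by omega)]
          rw [hwc]
          have hAd : decide (s[a]'(by omega) ≤ -1) = true := by simp [hA]
          have hfa : pvF (s[a]'(by omega)) = -1 - s[a]'(by omega) := by simp [pvF, hA]
          rw [Prod.mk.injEq, Prod.mk.injEq]
          refine ⟨?_, ?_, ?_⟩
          · simp [hfa]; ring
          · simp [hAd]; ring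
          · simp [hAd]; ring
      · -- first if does not fire; second must (sorted: last ≥ head ≥ 0)
        have hB : (0:Int) ≤ s[b-1]'(by omega) := by omega
        simp only [hga, hgb, if_neg hA, if_pos hB]
        have hright : (b:Int) - 1 = ((b-1 : Nat) : Int) := by omega
        rw [hright, ih a (b-1) _ (by omega) (by omega) (by omega)]
        have hwm := pvWin_concat s a b hab' hb
        rw [hwm]
        have hBd : decide (s[b-1]'(by omega) ≤ -1) = false := by simp; omega
        have hfb : pvF (s[b-1]'(by omega)) = |s[b-1]'(by omega) - 1| := by
          simp [pvF]; omega
        rw [Prod.mk.injEq, Prod.mk.injEq]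
        refine ⟨?_, ?_, ?_⟩
        · simp [hfb]; ring
        · simp [List.filter_append, hBd]
        · simp [List.filter_append, hBd]

-- in a sorted list, position i holds a value ≤ -1 iff i is below the count of such values
lemma sorted_index_iff (s : List Int) (hs : List.Pairwise (· ≤ ·) s) :
    ∀ (i : Nat) (h : i < s.length),
      (s[i] ≤ -1 ↔ i < (s.filter (fun v => decide (v ≤ -1))).length) := by
  induction s with
  | nil => intro i h; simp at h
  | cons v t iht =>
    intro i h
    have hv : ∀ y ∈ t, v ≤ y := fun y hy => (List.pairwise_cons.mp hs).1 y hy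
    have ht : List.Pairwise (· ≤ ·) t := (List.pairwise_cons.mp hs).2
    by_cases hvneg : v ≤ -1
    · have : (v :: t).filter (fun v => decide (v ≤ -1)) = v :: t.filter (fun v => decide (v ≤ -1)) := by
        simp [hvneg]
      rw [this]
      match i with
      | 0 => simpa using hvneg
      | i+1 =>
        have := iht ht i (by simpa using h)
        simpa using this
    · have hnil : t.filter (fun v => decide (v ≤ -1)) = [] := by
        rw [List.filter_eq_nil_iff]
        intro y hy
        have := hv y hy
        simp; omega
      have : (v :: t).filter (fun v => decide (v ≤ -1)) = [] := by
        simp [hvneg, hnil]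
      rw [this]
      simp only [List.length_nil]
      match i with
      | 0 => simpa using hvneg
      | i+1 =>
        have hit : i < t.length := by simpa using h
        have := hv _ (List.getElem_mem hit)
        simp only [List.getElem_cons_succ]
        constructor
        · intro hc; omega
        · intro hc; omega

-- B's min over the nonnegatives equals the sorted list's element at the split point
lemma min_filter_eq (ls : List Int) (s : List Int) (hperm : s.Perm ls)
    (hs : List.Pairwise (· ≤ ·) s)
    (hc : (s.filter (fun v => decide (v ≤ -1))).length < s.length) :
    (PySem.List.min? (ls.filter (fun v => decide (0 ≤ v))) (fun v => v)).getD 0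
      = s[(s.filter (fun v => decide (v ≤ -1))).length]'hc := by
  set c := (s.filter (fun v => decide (v ≤ -1))).length with hcdef
  have hsc : (0:Int) ≤ s[c] := by
    have := (sorted_index_iff s hs c hc).not
    simp only [lt_irrefl, iff_false, not_lt, not_le] at this
    omega
  have hmemf : s[c] ∈ ls.filter (fun v => decide (0 ≤ v)) := by
    rw [List.mem_filter]
    exact ⟨(hperm.mem_iff).mp (List.getElem_mem hc), by simpa using hsc⟩
  have hne : ls.filter (fun v => decide (0 ≤ v)) ≠ [] := by
    intro h; rw [h] at hmemf; simp at hmemf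
  obtain ⟨m, hm⟩ : ∃ m, PySem.List.min? (ls.filter (fun v => decide (0 ≤ v))) (fun v => v) = some m := by
    cases hmin : PySem.List.min? (ls.filter (fun v => decide (0 ≤ v))) (fun v => v) with
    | none => exact absurd ((PySem.List.min?_eq_none_iff _ _).mp hmin) hne
    | some m => exact ⟨m, rfl⟩
  rw [hm]
  have hmmem := PySem.List.min?_mem hm
  have hmle : m ≤ s[c] := PySem.List.min?_isMin hm _ hmemf
  have hmge : s[c] ≤ m := by
    obtain ⟨hmls, hm0⟩ := List.mem_filter.mp hmmem
    have hmins : m ∈ s := (hperm.mem_iff).mpr hmls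
    obtain ⟨j, hj, hje⟩ := List.mem_iff_getElem.mp hmins
    have h0m : (0:Int) ≤ m := by simpa using hm0
    have hjc : c ≤ j := by
      by_contra hlt
      have := (sorted_index_iff s hs j hj).mpr (by omega)
      rw [hje] at this; omega
    rcases Nat.lt_or_ge c j with h | h
    · have := (List.pairwise_iff_getElem.mp hs) c j hc hj h
      rw [hje] at this; exact this
    · have : c = j := by omega
      subst this; rw [hje]
  simp only [Option.getD_some]
  exact le_antisymm hmle hmge

-- ===== VERDICT (by name: the statement is the Claim_ definition above) =====
theorem multi1_spec : Claim_equal_multi1 := by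
  intro n ls _ hpre
  unfold Spec_multi1 multi1 multi1_alt
  set s := PySem.List.sorted ls (fun v => v) false with hsdef
  have hperm : s.Perm ls := PySem.List.sorted_perm ls (fun v => v) false
  have hs : List.Pairwise (· ≤ ·) s := by
    have := PySem.List.sorted_pairwise ls (fun v => v)
    simpa using this
  have hlen : s.length = ls.length := hperm.length_eq
  -- run the loop
  have hloop := loop_spec s hs (s.length + 1) 0 s.length 0 (by omega) (le_refl _) (by omega)
  have hwin0 : pvWin s 0 s.length = s := by simp [pvWin]
  rw [hwin0] at hloop
  have hstate : ((0:Nat):Int) - 1 = (-1 : Int) := by norm_num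
  rw [hstate] at hloop
  set c := (s.filter (fun v => decide (v ≤ -1))).length with hcdef
  -- translate A's state into c
  simp only [hloop]
  have hcls : (ls.filter (fun v => decide (v ≤ -1))).length = c := by
    rw [hcdef]; exact ((hperm.filter _).length_eq).symm
  have hsum : (ls.map pvF).sum = (s.map pvF).sum := ((hperm.map pvF).sum_eq).symm
  -- the parity tests agree
  have hmodA : ∀ x : Int, PySem.Int.mod x 2 = x % 2 :=
    fun x => PySem.Int.mod_eq_emod_of_pos (by norm_num)
  by_cases hodd : c % 2 = 1
  · -- A's post-block fires (left = c-1 even), and so does B's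
    have hcpos : 1 ≤ c := by omega
    have hAcond : PySem.Int.mod ((0:Nat) + (c:Int) - 1) 2 ≠ 1 := by
      rw [hmodA]; push_cast; omega
    rw [if_pos (by simpa using hAcond)]
    have hBcond : PySem.Int.mod ((ls.filter (fun v => decide (v ≤ -1))).length : Int) 2 = 1 := by
      rw [hmodA, hcls]; push_cast; omega
    rw [if_pos hBcond]
    have hclen : c < s.length := by
      rw [hlen]; rw [hcdef]
      have := hpre (by rw [hcls] at *; omega)
      omega
    -- identify the two reads
    have hga : pvGetI s ((0:Nat) + (c:Int)) = s[c]'hclen := by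
      have : ((0:Nat):Int) + (c:Int) = ((c:Nat):Int) := by push_cast; ring
      rw [this, pvGetI_nat s c hclen]
    have hgb : pvGetI s ((0:Nat) + (c:Int) - 1) = s[c-1]'(by omega) := by
      have : ((0:Nat):Int) + (c:Int) - 1 = ((c-1 : Nat):Int) := by omega
      rw [this, pvGetI_nat s (c-1) (by omega)]
    rw [hga, hgb]
    have hma : (PySem.List.min? (ls.filter (fun v => decide (0 ≤ v))) (fun v => v)).getD 0 = s[c]'hclen :=
      min_filter_eq ls s hperm hs hclen
    rw [hma]
    have hsafacts : (0:Int) ≤ s[c]'hclen := by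
      have := (sorted_index_iff s hs c hclen).not
      simp only [lt_irrefl, iff_false, not_lt, not_le] at this
      omega
    have hsb : s[c-1]'(by omega) ≤ -1 :=
      (sorted_index_iff s hs (c-1) (by omega)).mpr (by omega)
    rw [hsum]
    set A := s[c]'hclen
    set B := s[c-1]'(by omega)
    clear_value A B
    have habs : |A - 1| = if 1 ≤ A then A - 1 else 1 - A := by
      split_ifs with h1
      · rw [abs_of_nonneg (by omega)]
      · rw [abs_of_nonpos (by omega)]; ring
    by_cases h1 : 1 ≤ A
    · by_cases h2 : A + 1 ≥ 1 - B
      · rw [if_pos h2, if_pos h1]; ring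
      · rw [if_neg h2, habs]; simp only [if_pos h1]; ring
    · have hA0 : A = 0 := by omega
      have h2 : ¬ (A + 1 ≥ 1 - B) := by omega
      rw [if_neg h2, if_neg h1, habs, if_neg h1, hA0]
      ring
  · -- both post-blocks are skipped
    have hAcond : ¬ (PySem.Int.mod ((0:Nat) + (c:Int) - 1) 2 ≠ 1) := by
      rw [hmodA]; push_cast; omega
    rw [if_neg (by simpa using hAcond)]
    have hBcond : ¬ (PySem.Int.mod ((ls.filter (fun v => decide (v ≤ -1))).length : Int) 2 = 1) := by
      rw [hmodA, hcls]; push_cast; omega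
    rw [if_neg hBcond]
    rw [hsum]; ring
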